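-- pv_equiv track=rewrite | github.com/ChanhooKum/Deep_Realbook | utils/utils.py | replace_NC_tokens
-- ===== SOURCE A (Python) =====
-- def replace_NC_tokens(chords):
--     for i in range(len(chords)):
--         if chords[i] == [0,0,0,0,0,0,0,0,0,0,0,0]:  # NC token found
--             if i > 0:
--                 # Replace with previous chord
--                 chords[i] = chords[i-1]
--             else:
--                 # Look for the next non-NC chord and replace with it
--                 j = i + 1
--                 while j < len(chords) and chords[j] == [0,0,0,0,0,0,0,0,0,0,0,0]:
--                     j += 1
--                 if j < len(chords):
--                     chords[i] = chords[j]
--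
--     return chords
-- ===== SOURCE B (Python) =====
-- def replace_NC_tokens(chords):
--     NC = [0,0,0,0,0,0,0,0,0,0,0,0]
--     # forward pass: fill each NC with the nearest non-NC chord to its left
--     prev = None
--     for i in range(len(chords)):
--         if chords[i] != NC:
--             prev = chords[i]
--         elif prev is not None:
--             chords[i] = prev
--     # backward pass: fill the remaining (leading) NCs with the nearest non-NC to the right
--     nxt = None
--     for i in reversed(range(len(chords))):
--         if chords[i] != NC:
--             nxt = chords[i]
--         elif nxt is not None:
--             chords[i] = nxt
--     return chords
-- ===== Notes on version B (the rewrite author's own statement) =====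
-- stated objective: alternative
-- what changed: A's single index loop with a nested while-scan for a leading NC is replaced by two directional fill passes (forward carrying the last non-NC chord, then backward carrying the next non-NC chord).
import Mathlib
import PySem

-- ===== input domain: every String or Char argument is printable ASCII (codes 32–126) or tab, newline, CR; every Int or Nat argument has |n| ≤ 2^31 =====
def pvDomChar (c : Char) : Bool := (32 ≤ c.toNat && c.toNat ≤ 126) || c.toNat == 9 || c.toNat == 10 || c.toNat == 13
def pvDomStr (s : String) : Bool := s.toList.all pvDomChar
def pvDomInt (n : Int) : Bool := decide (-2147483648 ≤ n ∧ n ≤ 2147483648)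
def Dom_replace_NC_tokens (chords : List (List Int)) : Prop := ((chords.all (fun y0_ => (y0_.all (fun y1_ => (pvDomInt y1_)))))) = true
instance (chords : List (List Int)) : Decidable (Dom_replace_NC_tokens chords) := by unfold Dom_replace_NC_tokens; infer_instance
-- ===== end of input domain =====

-- B replaces A's index loop with inner while-scan by two directional fill passes (forward then
-- backward), a different decomposition of the same NC-filling task; equivalence is about the
-- returned list value (both Pythons mutate the argument in place and return it).

-- the NC token
def NCtok : List Int := [0,0,0,0,0,0,0,0,0,0,0,0]

-- ===== PORT A =====
-- A's inner `while j < len(chords) and chords[j] == NC: j += 1` loop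
def scanJ (cs : List (List Int)) (j : Nat) : Nat :=
  if h : j < cs.length then
    if cs.getD j [] = NCtok then scanJ cs (j+1) else j
  else j
termination_by cs.length - j

-- A's `for i in range(len(chords))` loop body; every index A uses is in range, so
-- List.getD/List.set are exact for Python's chords[i] reads and writes here.
def stepA (cs : List (List Int)) (i : Nat) : List (List Int) :=
  if cs.getD i [] = NCtok then
    if i > 0 then cs.set i (cs.getD (i-1) [])
    else
      let j := scanJ cs (i+1)
      if j < cs.length then cs.set i (cs.getD j []) else cs
  else cs

def replace_NC_tokens (chords : List (List Int)) : List (List Int) :=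
  (List.range chords.length).foldl stepA chords

-- ===== PORT B =====
-- one directional fill pass carrying the last non-NC chord seen (Source B's two loops both have
-- this shape; the backward loop is this pass run over the reversed list)
def fillPass (prev : Option (List Int)) : List (List Int) → List (List Int)
  | [] => []
  | c :: rest =>
    if c ≠ NCtok then c :: fillPass (some c) rest
    else match prev with
      | some p => p :: fillPass (some p) rest
      | none => c :: fillPass none rest

def replace_NC_tokens_alt (chords : List (List Int)) : List (List Int) :=
  (fillPass none (fillPass none chords).reverse).reverse

-- ===== PRECONDITION & SPEC =====
def Spec_replace_NC_tokens (chords : List (List Int)) (out : List (List Int)) : Prop := out = replace_NC_tokens_alt chords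
instance (chords : List (List Int)) (out : List (List Int)) : Decidable (Spec_replace_NC_tokens chords out) := by unfold Spec_replace_NC_tokens; infer_instance

-- ===== CLAIM (what is proved, stated in full; the proofs are below) =====
def Claim_equal_replace_NC_tokens : Prop := ∀ (chords : List (List Int)), Dom_replace_NC_tokens chords → Spec_replace_NC_tokens chords (replace_NC_tokens chords)

-- ===== LEMMAS AND PROOFS =====

theorem getD_append_len (l t : List (List Int)) (d : List Int) :
    (l ++ t).getD l.length d = t.getD 0 d := by
  simp [List.getD, List.getElem?_append_right]

theorem getD_append_lt (l t : List (List Int)) (d : List Int) (j : Nat) (h : j < l.length) :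
    (l ++ t).getD j d = l.getD j d := by
  simp [List.getD, List.getElem?_append_left h]

theorem set_append_len (l rest : List (List Int)) (c x : List Int) :
    (l ++ c :: rest).set l.length x = l ++ x :: rest := by
  induction l with
  | nil => simp
  | cons a l ih =>
    simp only [List.cons_append, List.length_cons, List.set_cons_succ]
    rw [ih]


theorem getD_mem (l : List (List Int)) (j : Nat) (d : List Int) (h : j < l.length) :
    l.getD j d ∈ l := by
  simp [List.getD, List.getElem?_eq_getElem h, List.getElem_mem]

-- A's main loop from index done'.length+1 on, with p the chord at the previous index,
-- performs exactly a forward fill of the untouched suffix.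
theorem mainLoop (todo : List (List Int)) :
    ∀ (done' : List (List Int)) (p : List Int),
    List.foldl stepA ((done' ++ [p]) ++ todo) (List.range' (done'.length + 1) todo.length)
      = (done' ++ [p]) ++ fillPass (some p) todo := by
  induction todo with
  | nil => intro done' p; simp [fillPass]
  | cons c rest ih =>
    intro done' p
    rw [List.length_cons, List.range'_succ, List.foldl_cons]
    have hstep : stepA ((done' ++ [p]) ++ c :: rest) (done'.length + 1)
        = (done' ++ [p]) ++ (if c = NCtok then p else c) :: rest := by
      unfold stepA
      have h1 : ((done' ++ [p]) ++ c :: rest).getD (done'.length + 1) [] = c := by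
        have := getD_append_len (done' ++ [p]) (c :: rest) []
        simpa using this
      have h2 : ((done' ++ [p]) ++ c :: rest).getD (done'.length + 1 - 1) [] = p := by
        have := getD_append_len done' ([p] ++ c :: rest) []
        simpa using this
      rw [h1]
      by_cases hc : c = NCtok
      · rw [if_pos hc, if_pos (Nat.succ_pos _), h2, hc]
        have : done'.length + 1 = (done' ++ [p]).length := by simp
        rw [this, set_append_len]
        simp
      · rw [if_neg hc, if_neg hc]
    rw [hstep]
    by_cases hc : c = NCtok
    · rw [if_pos hc]
      have harr : (done' ++ [p]) ++ p :: rest = ((done' ++ [p]) ++ [p]) ++ rest := by simp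
      have hlen : done'.length + 1 + 1 = (done' ++ [p]).length + 1 := by simp
      rw [harr, hlen, ih (done' ++ [p]) p]
      simp [fillPass, hc]
    · rw [if_neg hc]
      have harr : (done' ++ [p]) ++ c :: rest = ((done' ++ [p]) ++ [c]) ++ rest := by simp
      have hlen : done'.length + 1 + 1 = (done' ++ [p]).length + 1 := by simp
      rw [harr, hlen, ih (done' ++ [p]) c]
      simp [fillPass, hc]

-- fillPass facts ---------------------------------------------------------

theorem fill_noNC (l : List (List Int)) :
    ∀ n0, (∀ x ∈ l, x ≠ NCtok) → fillPass n0 l = l := by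
  induction l with
  | nil => intro n0 _; rfl
  | cons c rest ih =>
    intro n0 h
    have hc : c ≠ NCtok := h c (by simp)
    simp [fillPass, hc, ih (some c) (fun x hx => h x (by simp [hx]))]

theorem fill_some_noNC (l : List (List Int)) :
    ∀ p, p ≠ NCtok → ∀ x ∈ fillPass (some p) l, x ≠ NCtok := by
  induction l with
  | nil => intro p _ x hx; simp [fillPass] at hx
  | cons c rest ih =>
    intro p hp x hx
    by_cases hc : c = NCtok
    · simp [fillPass, hc] at hx
      rcases hx with h | h
      · rw [h]; exact hp
      · exact ih p hp x h
    · simp [fillPass, hc] at hx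
      rcases hx with h | h
      · rw [h]; exact hc
      · exact ih c hc x h

theorem fill_none_allNC (l : List (List Int)) (h : ∀ x ∈ l, x = NCtok) :
    fillPass none l = l := by
  induction l with
  | nil => rfl
  | cons c rest ih =>
    have hc : c = NCtok := h c (by simp)
    simp [fillPass, hc, ih (fun x hx => h x (by simp [hx]))]

theorem fill_some_allNC (l : List (List Int)) (h : ∀ x ∈ l, x = NCtok) :
    fillPass (some NCtok) l = l := by
  induction l with
  | nil => rfl
  | cons c rest ih =>
    have hc : c = NCtok := h c (by simp)
    simp [fillPass, hc, ih (fun x hx => h x (by simp [hx]))]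

theorem fill_some_repl (k : Nat) (p : List Int) (l : List (List Int)) :
    fillPass (some p) (List.replicate k NCtok ++ l) = List.replicate k p ++ fillPass (some p) l := by
  induction k with
  | zero => simp
  | succ n ih => simp [List.replicate_succ, fillPass, ih]

theorem fill_none_repl (k : Nat) (l : List (List Int)) :
    fillPass none (List.replicate k NCtok ++ l) = List.replicate k NCtok ++ fillPass none l := by
  induction k with
  | zero => simp
  | succ n ih => simp [List.replicate_succ, fillPass, ih]

theorem fill_split (l : List (List Int)) :
    ∀ n0 m, (∀ x ∈ l, x ≠ NCtok) → l ≠ [] →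
    fillPass n0 (l ++ m) = l ++ fillPass (some (l.getLastD [])) m := by
  induction l with
  | nil => intro _ _ _ h; exact absurd rfl h
  | cons c rest ih =>
    intro n0 m h _
    have hc : c ≠ NCtok := h c (by simp)
    rcases rest with _ | ⟨d, rest'⟩
    · simp [fillPass, hc]
    · have := ih (some c) m (fun x hx => h x (by simp [hx])) (by simp)
      simp [fillPass, hc] at this ⊢
      rw [this]

-- decomposition of a list into all-NC or leading NCs + first non-NC
theorem decompNC (t : List (List Int)) :
    (∀ x ∈ t, x = NCtok) ∨
    ∃ k v r, v ≠ NCtok ∧ t = List.replicate k NCtok ++ v :: r := by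
  induction t with
  | nil => left; simp
  | cons c rest ih =>
    by_cases hc : c = NCtok
    · rcases ih with h | ⟨k, v, r, hv, hr⟩
      · left; intro x hx; rcases List.mem_cons.1 hx with h' | h'
        · rw [h', hc]
        · exact h x h'
      · right; exact ⟨k + 1, v, r, hv, by simp [hc, List.replicate_succ, hr]⟩
    · right; exact ⟨0, c, rest, hc, by simp⟩

-- scanJ facts ------------------------------------------------------------

theorem scan_all (cs : List (List Int)) (h : ∀ x ∈ cs, x = NCtok) :
    ∀ n j, cs.length - j ≤ n → j ≤ cs.length → scanJ cs j = cs.length := by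
  intro n
  induction n with
  | zero =>
    intro j h1 h2
    have : j = cs.length := by omega
    rw [scanJ]; simp [this]
  | succ n ih =>
    intro j h1 h2
    rw [scanJ]
    by_cases hj : j < cs.length
    · rw [dif_pos hj]
      have hg : cs.getD j [] = NCtok := h _ (getD_mem cs j [] hj)
      rw [if_pos hg]
      exact ih (j + 1) (by omega) (by omega)
    · have : j = cs.length := by omega
      simp [this]

theorem scan_repl_at (a : Nat) (v : List Int) (r : List (List Int)) (hv : v ≠ NCtok) :
    scanJ (List.replicate a NCtok ++ v :: r) a = a := by
  rw [scanJ]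
  have hlt : a < (List.replicate a NCtok ++ v :: r).length := by simp
  have hget : (List.replicate a NCtok ++ v :: r).getD a [] = v := by
    have := getD_append_len (List.replicate a NCtok) (v :: r) []
    simpa using this
  rw [dif_pos hlt, hget, if_neg hv]

theorem scan_repl (a : Nat) (v : List Int) (r : List (List Int)) (hv : v ≠ NCtok) :
    ∀ n j, a - j ≤ n → j ≤ a →
    scanJ (List.replicate a NCtok ++ v :: r) j = a := by
  intro n
  induction n with
  | zero =>
    intro j h1 h2
    have hj : j = a := by omega
    rw [hj]; exact scan_repl_at a v r hv
  | succ n ih =>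
    intro j h1 h2
    by_cases hj : j < a
    · rw [scanJ]
      have hlt : j < (List.replicate a NCtok ++ v :: r).length := by simp; omega
      have hget : (List.replicate a NCtok ++ v :: r).getD j [] = NCtok := by
        rw [getD_append_lt _ _ _ j (by simpa using hj)]
        simp [List.getD, hj]
      rw [dif_pos hlt, hget, if_pos rfl]
      exact ih (j + 1) (by omega) (by omega)
    · have hj' : j = a := by omega
      rw [hj']; exact scan_repl_at a v r hv

-- characterizations of A -------------------------------------------------

theorem A_head_nonNC (c : List Int) (t : List (List Int)) (hc : c ≠ NCtok) :
    replace_NC_tokens (c :: t) = c :: fillPass (some c) t := by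
  unfold replace_NC_tokens
  rw [List.length_cons, List.range_eq_range', List.range'_succ, List.foldl_cons]
  have h0 : stepA (c :: t) 0 = c :: t := by
    unfold stepA; simp [List.getD, hc]
  rw [h0]
  have := mainLoop t [] c
  simpa using this

theorem A_all (c : List Int) (t : List (List Int)) (hc : c = NCtok) (h : ∀ x ∈ t, x = NCtok) :
    replace_NC_tokens (c :: t) = c :: t := by
  subst hc
  unfold replace_NC_tokens
  rw [List.length_cons, List.range_eq_range', List.range'_succ, List.foldl_cons]
  have hall : ∀ x ∈ NCtok :: t, x = NCtok := by
    intro x hx; rcases List.mem_cons.1 hx with h' | h'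
    · rw [h']
    · exact h x h'
  have h0 : stepA (NCtok :: t) 0 = NCtok :: t := by
    unfold stepA
    have hscan : scanJ (NCtok :: t) 1 = (NCtok :: t).length :=
      scan_all (NCtok :: t) hall ((NCtok :: t).length) 1 (by omega) (by simp)
    simp [List.getD, hscan]
  rw [h0]
  have := mainLoop t [] NCtok
  simp at this
  rw [this, fill_some_allNC t h]

theorem A_head_NC (k : Nat) (v : List Int) (r : List (List Int)) (hv : v ≠ NCtok) :
    replace_NC_tokens (NCtok :: (List.replicate k NCtok ++ v :: r))
      = v :: fillPass (some v) (List.replicate k NCtok ++ v :: r) := by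
  unfold replace_NC_tokens
  rw [List.length_cons, List.range_eq_range', List.range'_succ, List.foldl_cons]
  have hform : NCtok :: (List.replicate k NCtok ++ v :: r)
      = List.replicate (k + 1) NCtok ++ v :: r := by
    simp [List.replicate_succ]
  have h0 : stepA (NCtok :: (List.replicate k NCtok ++ v :: r)) 0
      = v :: (List.replicate k NCtok ++ v :: r) := by
    unfold stepA
    have hscan : scanJ (NCtok :: (List.replicate k NCtok ++ v :: r)) 1 = k + 1 := by
      rw [hform]; exact scan_repl (k + 1) v r hv (k + 1) 1 (by omega) (by omega)
    simp [List.getD, hscan, List.set]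
  rw [h0]
  have := mainLoop (List.replicate k NCtok ++ v :: r) [] v
  simpa using this

-- characterizations of B -------------------------------------------------

theorem B_all (l : List (List Int)) (h : ∀ x ∈ l, x = NCtok) :
    replace_NC_tokens_alt l = l := by
  unfold replace_NC_tokens_alt
  rw [fill_none_allNC l h]
  rw [fill_none_allNC l.reverse (fun x hx => h x (List.mem_reverse.1 hx))]
  exact List.reverse_reverse l

theorem B_head_nonNC (c : List Int) (t : List (List Int)) (hc : c ≠ NCtok) :
    replace_NC_tokens_alt (c :: t) = c :: fillPass (some c) t := by
  unfold replace_NC_tokens_alt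
  have h1 : fillPass none (c :: t) = c :: fillPass (some c) t := by
    simp [fillPass, hc]
  rw [h1]
  have hno : ∀ x ∈ (c :: fillPass (some c) t).reverse, x ≠ NCtok := by
    intro x hx
    rcases List.mem_cons.1 (List.mem_reverse.1 hx) with h' | h'
    · rw [h']; exact hc
    · exact fill_some_noNC t c hc x h'
  rw [fill_noNC _ none hno, List.reverse_reverse]

theorem getLastD_reverse_cons (c : List Int) (t : List (List Int)) :
    (c :: t).reverse.getLastD [] = c := by
  rw [List.reverse_cons]
  simp

theorem B_head_NC (k : Nat) (v : List Int) (r : List (List Int)) (hv : v ≠ NCtok) :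
    replace_NC_tokens_alt (List.replicate (k + 1) NCtok ++ v :: r)
      = List.replicate (k + 1) v ++ v :: fillPass (some v) r := by
  unfold replace_NC_tokens_alt
  rw [fill_none_repl]
  have h1 : fillPass none (v :: r) = v :: fillPass (some v) r := by
    simp [fillPass, hv]
  rw [h1]
  set L := v :: fillPass (some v) r with hL
  have hnoL : ∀ x ∈ L, x ≠ NCtok := by
    intro x hx
    rcases List.mem_cons.1 hx with h' | h'
    · rw [h']; exact hv
    · exact fill_some_noNC r v hv x h'
  rw [List.reverse_append, List.reverse_replicate]
  have hLrev_ne : L.reverse ≠ [] := by simp [hL]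
  have hnoLrev : ∀ x ∈ L.reverse, x ≠ NCtok := fun x hx => hnoL x (List.mem_reverse.1 hx)
  rw [fill_split L.reverse none (List.replicate (k + 1) NCtok) hnoLrev hLrev_ne]
  have hlast : L.reverse.getLastD [] = v := getLastD_reverse_cons v (fillPass (some v) r)
  rw [hlast]
  have hfill : fillPass (some v) (List.replicate (k + 1) NCtok) = List.replicate (k + 1) v := by
    have := fill_some_repl (k + 1) v []
    simpa [fillPass] using this
  rw [hfill, List.reverse_append, List.reverse_reverse, List.reverse_replicate]

-- ===== VERDICT (by name: the statement is the Claim_ definition above) =====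
theorem replace_NC_tokens_spec : Claim_equal_replace_NC_tokens := by
  intro chords _
  unfold Spec_replace_NC_tokens
  rcases chords with _ | ⟨c, t⟩
  · simp [replace_NC_tokens, replace_NC_tokens_alt, fillPass]
  · by_cases hc : c = NCtok
    · rcases decompNC t with h | ⟨k, v, r, hv, hr⟩
      · rw [A_all c t hc h, B_all (c :: t) (by
          intro x hx; rcases List.mem_cons.1 hx with h' | h'
          · rw [h', hc]
          · exact h x h')]
      · subst hr; rw [hc]
        rw [A_head_NC k v r hv]
        have hform : NCtok :: (List.replicate k NCtok ++ v :: r)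
            = List.replicate (k + 1) NCtok ++ v :: r := by
          simp [List.replicate_succ]
        rw [hform, B_head_NC k v r hv]
        rw [fill_some_repl k v (v :: r)]
        simp [fillPass, hv, List.replicate_succ]
    · rw [A_head_nonNC c t hc, B_head_nonNC c t hc]
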